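-- pv_equiv track=rewrite | github.com/TeraokaKanekoLab/Tree-Decomposition | src/evaluate/dist_leaf.py | find_dist_from_leaf
-- ===== SOURCE A (Python) =====
-- def find_dist_from_leaf(childrens, nd, dists):
--     max = 0
--     if nd in dists:
--         return dists[nd]
--     if nd not in childrens:
--         return 0
--     for child in childrens[nd]:
--         d = find_dist_from_leaf(childrens, child, dists) + 1
--         if d > max:
--             max = d
--     dists[nd] = max
--     return max
-- ===== SOURCE B (Python) =====
-- def find_dist_from_leaf(childrens, nd, dists):
--     # Bottom-up Bellman-Ford-style relaxation over a work table instead of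
--     # recursive memoized DFS; does NOT mutate dists (return value only).
--     if nd in dists:
--         return dists[nd]
--     if nd not in childrens:
--         return 0
--     h = dict(dists)
--     for _ in range(len(childrens)):
--         changed = False
--         for v in childrens:
--             if v not in dists:
--                 best = 0
--                 for c in childrens[v]:
--                     d = h.get(c, 0) + 1
--                     if d > best:
--                         best = d
--                 if h.get(v) != best:
--                     h[v] = best
--                     changed = True
--         if not changed:
--             break
--     return h[nd]
-- ===== Notes on version B (the rewrite author's own statement) =====
-- stated objective: alternative
-- what changed: Replaces A's recursive memoized DFS (which writes results back into the caller's dists) with an iterative bottom-up Bellman-Ford-style relaxation over a fresh work table, repeated until a full pass changes nothing; B never mutates dists and uses no recursion (return value only is claimed equal).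
import Mathlib
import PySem

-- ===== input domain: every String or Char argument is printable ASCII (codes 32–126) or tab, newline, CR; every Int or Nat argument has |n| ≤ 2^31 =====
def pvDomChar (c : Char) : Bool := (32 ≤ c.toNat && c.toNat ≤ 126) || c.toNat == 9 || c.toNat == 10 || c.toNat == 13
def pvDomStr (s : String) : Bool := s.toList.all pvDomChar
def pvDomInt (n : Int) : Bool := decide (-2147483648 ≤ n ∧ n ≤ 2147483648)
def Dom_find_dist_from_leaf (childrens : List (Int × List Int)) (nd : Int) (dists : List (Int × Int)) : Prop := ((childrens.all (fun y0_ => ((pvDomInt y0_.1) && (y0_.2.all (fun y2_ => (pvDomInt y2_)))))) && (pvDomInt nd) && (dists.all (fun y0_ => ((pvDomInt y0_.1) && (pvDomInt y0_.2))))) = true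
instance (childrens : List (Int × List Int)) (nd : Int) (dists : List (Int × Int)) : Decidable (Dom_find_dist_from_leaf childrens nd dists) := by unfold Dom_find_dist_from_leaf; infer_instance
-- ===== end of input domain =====

-- B replaces A's recursive memoized DFS (which mutates `dists`) by a bottom-up
-- Bellman-Ford-style relaxation over a fresh work table; objective: alternative
-- (no recursion, no mutation of the caller's `dists` — return value only is proved equal).

-- ===== PORT A =====
-- the inner for-loop of A, threading the mutable `dists` dict and the running max
def pvALoopA (g : Int → PySem.Dict Int Int → Option (Int × PySem.Dict Int Int)) :
    List Int → Int → PySem.Dict Int Int → Option (Int × PySem.Dict Int Int)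
  | [], mx, D => some (mx, D)
  | c :: cs, mx, D =>
    match g c D with
    | none => none
    | some (d0, D') => pvALoopA g cs (if d0 + 1 > mx then d0 + 1 else mx) D'

-- A's recursion, with fuel (none = the recursion does not terminate within the fuel;
-- under Pre_ the fuel #keys+1 is shown sufficient)
def pvFindA (C : PySem.Dict Int (List Int)) : Nat → Int → PySem.Dict Int Int →
    Option (Int × PySem.Dict Int Int)
  | 0, _, _ => none
  | f + 1, nd, D =>
    match PySem.Dict.get? D nd with
    | some x => some (x, D)                          -- if nd in dists: return dists[nd]
    | none =>
      match PySem.Dict.get? C nd with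
      | none => some (0, D)                          -- if nd not in childrens: return 0
      | some cs =>
        match pvALoopA (pvFindA C f) cs 0 D with     -- for child in childrens[nd]: ...
        | none => none
        | some (mx, D') => some (mx, PySem.Dict.insert D' nd mx)   -- dists[nd] = max

def find_dist_from_leaf (childrens : List (Int × List Int)) (nd : Int) (dists : List (Int × Int)) : Int :=
  match pvFindA ⟨childrens⟩ ((PySem.List.dedup (childrens.map Prod.fst)).length + 1) nd ⟨dists⟩ with
  | some (r, _) => r
  | none => 0     -- unreachable under Pre_find_dist_from_leaf (proved)

-- ===== PORT B =====
-- best = max(0, h.get(c,0)+1 for c in childrens[v])  (running max, as Source B writes it)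
def pvBest (C : PySem.Dict Int (List Int)) (h : PySem.Dict Int Int) (v : Int) : Int :=
  ((PySem.Dict.get? C v).getD []).foldl
    (fun best c => let d := PySem.Dict.getD h c 0 + 1; if d > best then d else best) 0

-- one pass of `for v in childrens: ...`, threading the table h and the changed flag
def pvBLoop (C : PySem.Dict Int (List Int)) (D0 : PySem.Dict Int Int) :
    List Int → PySem.Dict Int Int → Bool → PySem.Dict Int Int × Bool
  | [], h, ch => (h, ch)
  | v :: vs, h, ch =>
    if (PySem.Dict.get? D0 v).isSome then pvBLoop C D0 vs h ch       -- if v not in dists: (skip)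
    else
      let best := pvBest C h v
      if PySem.Dict.get? h v = some best then pvBLoop C D0 vs h ch   -- h.get(v) != best is false
      else pvBLoop C D0 vs (PySem.Dict.insert h v best) true

-- `for _ in range(len(childrens)):` with the early `break` when a round changes nothing
def pvIterB (C : PySem.Dict Int (List Int)) (D0 : PySem.Dict Int Int) :
    Nat → PySem.Dict Int Int → PySem.Dict Int Int
  | 0, h => h
  | r + 1, h =>
    match pvBLoop C D0 (PySem.List.dedup C.keys) h false with
    | (h', true) => pvIterB C D0 r h'
    | (h', false) => h'

def find_dist_from_leaf_alt (childrens : List (Int × List Int)) (nd : Int) (dists : List (Int × Int)) : Int :=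
  match PySem.Dict.get? (⟨dists⟩ : PySem.Dict Int Int) nd with
  | some x => x
  | none =>
    match PySem.Dict.get? (⟨childrens⟩ : PySem.Dict Int (List Int)) nd with
    | none => 0
    | some _ =>
      -- h[nd] : nd is an uncached key, so it is present after the first round (rounds ≥ 1)
      PySem.Dict.getD
        (pvIterB ⟨childrens⟩ ⟨dists⟩ (PySem.List.dedup (childrens.map Prod.fst)).length ⟨dists⟩) nd 0

-- ===== PRECONDITION & SPEC =====
-- helpers for Pre_: Kahn-style leaf peeling of the "active" (uncached) subgraph of childrens
def pvActive (childrens : List (Int × List Int)) (dists : List (Int × Int)) (v : Int) : Bool :=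
  (PySem.Dict.get? (⟨childrens⟩ : PySem.Dict Int (List Int)) v).isSome &&
  (PySem.Dict.get? (⟨dists⟩ : PySem.Dict Int Int) v).isNone

def pvPeel (childrens : List (Int × List Int)) (dists : List (Int × Int)) (done : List Int) : List Int :=
  (PySem.List.dedup (childrens.map Prod.fst)).filter (fun v =>
    pvActive childrens dists v &&
    ((PySem.Dict.get? (⟨childrens⟩ : PySem.Dict Int (List Int)) v).getD []).all
      (fun c => !pvActive childrens dists c || done.contains c))

def pvDone (childrens : List (Int × List Int)) (dists : List (Int × Int)) : Nat → List Int
  | 0 => []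
  | k + 1 => pvPeel childrens dists (pvDone childrens dists k)

-- Pre_: A's recursion from nd terminates, i.e. the part of the childrens graph that the
-- recursion can reach through uncached ("active") nodes is acyclic: nd, if active, is
-- peelable by iterated leaf-removal.  On inputs outside Pre_ the Python A hits a cycle of
-- uncached nodes and raises RecursionError.
def Pre_find_dist_from_leaf (childrens : List (Int × List Int)) (nd : Int) (dists : List (Int × Int)) : Prop :=
  pvActive childrens dists nd = true →
    nd ∈ pvDone childrens dists (PySem.List.dedup (childrens.map Prod.fst)).length

instance (childrens : List (Int × List Int)) (nd : Int) (dists : List (Int × Int)) :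
    Decidable (Pre_find_dist_from_leaf childrens nd dists) := by
  unfold Pre_find_dist_from_leaf; infer_instance

def pvWitness_find_dist_from_leaf : (List (Int × List Int)) × Int × (List (Int × Int)) :=
  ([(1, [2, 3]), (2, [3]), (3, [])], 1, [(3, 4)])

def Spec_find_dist_from_leaf (childrens : List (Int × List Int)) (nd : Int) (dists : List (Int × Int)) (out : Int) : Prop := out = find_dist_from_leaf_alt childrens nd dists
instance (childrens : List (Int × List Int)) (nd : Int) (dists : List (Int × Int)) (out : Int) : Decidable (Spec_find_dist_from_leaf childrens nd dists out) := by unfold Spec_find_dist_from_leaf; infer_instance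

-- ===== CLAIM (what is proved, stated in full; the proofs are below) =====
def Claim_equal_find_dist_from_leaf : Prop := ∀ (childrens : List (Int × List Int)) (nd : Int) (dists : List (Int × Int)), Dom_find_dist_from_leaf childrens nd dists → Pre_find_dist_from_leaf childrens nd dists → Spec_find_dist_from_leaf childrens nd dists (find_dist_from_leaf childrens nd dists)

-- ===== LEMMAS AND PROOFS =====

-- the semantic height function both ports are proved to compute (fuel-indexed)
def pvHfold (g : Int → Option Int) : List Int → Option Int → Option Int
  | [], acc => acc
  | c :: cs, acc =>
    pvHfold g cs
      (match acc, g c with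
       | some m, some d0 => some (if d0 + 1 > m then d0 + 1 else m)
       | _, _ => none)

def pvH (childrens : List (Int × List Int)) (dists : List (Int × Int)) : Nat → Int → Option Int
  | 0, _ => none
  | k + 1, v =>
    match PySem.Dict.get? (⟨dists⟩ : PySem.Dict Int Int) v with
    | some x => some x
    | none =>
      match PySem.Dict.get? (⟨childrens⟩ : PySem.Dict Int (List Int)) v with
      | none => some 0
      | some cs => pvHfold (pvH childrens dists k) cs (some 0)

-- canonical value of pvH (total form, used to state invariants)
def pvW (childrens : List (Int × List Int)) (dists : List (Int × Int)) (k : Nat) (v : Int) : Int :=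
  (pvH childrens dists k v).getD 0

theorem pvHfold_none (g : Int → Option Int) : ∀ cs, pvHfold g cs none = none := by
  intro cs; induction cs with
  | nil => rfl
  | cons c cs ih => simp [pvHfold, ih]

theorem pvHfold_mono {g g' : Int → Option Int}
    (hg : ∀ c x, g c = some x → g' c = some x) :
    ∀ cs acc m, pvHfold g cs acc = some m → pvHfold g' cs acc = some m := by
  intro cs; induction cs with
  | nil => intro acc m h; simpa [pvHfold] using h
  | cons c cs ih =>
    intro acc m h
    match hacc : acc with
    | none => simp [pvHfold, pvHfold_none] at h
    | some m0 =>
      simp only [pvHfold] at h ⊢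
      match hc : g c with
      | none => rw [hc] at h; simp [pvHfold_none] at h
      | some d0 =>
        rw [hc] at h
        rw [hg c d0 hc]
        exact ih _ _ h

theorem pvHfold_eval {g : Int → Option Int} {w : Int → Int} :
    ∀ cs m0, (∀ c ∈ cs, g c = some (w c)) →
      pvHfold g cs (some m0) =
        some (cs.foldl (fun m c => if w c + 1 > m then w c + 1 else m) m0) := by
  intro cs; induction cs with
  | nil => intro m0 _; rfl
  | cons c cs ih =>
    intro m0 h
    have hc : g c = some (w c) := h c (by simp)
    simp only [pvHfold, hc, List.foldl_cons]
    exact ih _ (fun c' hc' => h c' (by simp [hc']))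

theorem pvH_mono (childrens : List (Int × List Int)) (dists : List (Int × Int)) :
    ∀ k v x, pvH childrens dists k v = some x → pvH childrens dists (k + 1) v = some x := by
  intro k
  induction k with
  | zero => intro v x h; simp [pvH] at h
  | succ k ih =>
    intro v x h
    simp only [pvH] at h ⊢
    match h1 : PySem.Dict.get? (⟨dists⟩ : PySem.Dict Int Int) v with
    | some y => rw [h1] at h; exact h
    | none =>
      rw [h1] at h
      match h2 : PySem.Dict.get? (⟨childrens⟩ : PySem.Dict Int (List Int)) v with
      | none => rw [h2] at h; exact h
      | some cs =>
        rw [h2] at h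
        exact pvHfold_mono (fun c y hc => ih c y hc) cs _ _ h

theorem pvH_le (childrens : List (Int × List Int)) (dists : List (Int × Int)) {k m : Nat}
    (h : k ≤ m) : ∀ v x, pvH childrens dists k v = some x → pvH childrens dists m v = some x := by
  induction m, h using Nat.le_induction with
  | base => exact fun v x hx => hx
  | succ m _ ih => exact fun v x hx => pvH_mono childrens dists m v x (ih v x hx)

theorem pvH_unique (childrens : List (Int × List Int)) (dists : List (Int × Int)) {k m : Nat}
    {v : Int} {x y : Int} (hx : pvH childrens dists k v = some x)
    (hy : pvH childrens dists m v = some y) : x = y := by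
  rcases Nat.le_total k m with h | h
  · have := pvH_le childrens dists h v x hx; rw [this] at hy; exact (Option.some_inj.mp hy)
  · have := pvH_le childrens dists h v y hy; rw [this] at hx; exact (Option.some_inj.mp hx).symm

theorem pvW_eq_of_some (childrens : List (Int × List Int)) (dists : List (Int × Int)) {k : Nat}
    {v : Int} {x : Int} (hx : pvH childrens dists k v = some x) :
    pvW childrens dists k v = x := by
  simp [pvW, hx]

-- inactive nodes have a height at fuel 1 already
theorem pvH_one_of_inactive (childrens : List (Int × List Int)) (dists : List (Int × Int))
    {v : Int} (h : pvActive childrens dists v = false) :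
    ∃ x, pvH childrens dists 1 v = some x := by
  simp only [pvActive, Bool.and_eq_false_iff] at h
  simp only [pvH]
  match h1 : PySem.Dict.get? (⟨dists⟩ : PySem.Dict Int Int) v with
  | some y => exact ⟨y, rfl⟩
  | none =>
    match h2 : PySem.Dict.get? (⟨childrens⟩ : PySem.Dict Int (List Int)) v with
    | none => exact ⟨0, rfl⟩
    | some cs => rw [h1, h2] at h; simp at h

theorem pvDone_subset_keys (childrens : List (Int × List Int)) (dists : List (Int × Int)) :
    ∀ k v, v ∈ pvDone childrens dists k → v ∈ PySem.List.dedup (childrens.map Prod.fst) := by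
  intro k v h
  cases k with
  | zero => simp [pvDone] at h
  | succ k => exact List.mem_of_mem_filter h

-- membership characterisation of one peel step
theorem pvPeel_mem (childrens : List (Int × List Int)) (dists : List (Int × Int))
    {done : List Int} {v : Int} (h : v ∈ pvPeel childrens dists done) :
    v ∈ PySem.List.dedup (childrens.map Prod.fst) ∧ pvActive childrens dists v = true ∧
    ∀ c ∈ (PySem.Dict.get? (⟨childrens⟩ : PySem.Dict Int (List Int)) v).getD [],
      pvActive childrens dists c = false ∨ c ∈ done := by
  have hmem := List.mem_of_mem_filter h
  have hp := List.of_mem_filter h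
  simp only [Bool.and_eq_true, List.all_eq_true] at hp
  refine ⟨hmem, hp.1, fun c hc => ?_⟩
  have := hp.2 c hc
  rcases Bool.or_eq_true_iff.mp this with h1 | h1
  · left; simpa using h1
  · right; simpa [List.contains_iff_mem] using h1

theorem pvPeel_of (childrens : List (Int × List Int)) (dists : List (Int × Int))
    {done : List Int} {v : Int}
    (hmem : v ∈ PySem.List.dedup (childrens.map Prod.fst))
    (hact : pvActive childrens dists v = true)
    (hch : ∀ c ∈ (PySem.Dict.get? (⟨childrens⟩ : PySem.Dict Int (List Int)) v).getD [],
      pvActive childrens dists c = false ∨ c ∈ done) :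
    v ∈ pvPeel childrens dists done := by
  refine List.mem_filter.mpr ⟨hmem, ?_⟩
  simp only [Bool.and_eq_true, List.all_eq_true]
  refine ⟨hact, fun c hc => ?_⟩
  rcases hch c hc with h1 | h1
  · exact Bool.or_eq_true_iff.mpr (Or.inl (by simp [h1]))
  · exact Bool.or_eq_true_iff.mpr (Or.inr (by simpa [List.contains_iff_mem] using h1))

theorem pvDone_mono (childrens : List (Int × List Int)) (dists : List (Int × Int)) :
    ∀ k v, v ∈ pvDone childrens dists k → v ∈ pvDone childrens dists (k + 1) := by
  intro k
  induction k with
  | zero => intro v h; simp [pvDone] at h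
  | succ k ih =>
    intro v h
    obtain ⟨hmem, hact, hch⟩ := pvPeel_mem childrens dists h
    exact pvPeel_of childrens dists hmem hact
      (fun c hc => (hch c hc).imp id (ih c))

theorem pvDone_some (childrens : List (Int × List Int)) (dists : List (Int × Int)) :
    ∀ k v, v ∈ pvDone childrens dists k → ∃ x, pvH childrens dists (k + 1) v = some x := by
  intro k
  induction k with
  | zero => intro v h; simp [pvDone] at h
  | succ k ih =>
    intro v h
    obtain ⟨_, hact, hch⟩ := pvPeel_mem childrens dists h
    simp only [pvActive, Bool.and_eq_true, Option.isSome_iff_exists, Option.isNone_iff_eq_none] at hact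
    obtain ⟨⟨cs, hcs⟩, hdists⟩ := hact
    have hchildren : ∀ c ∈ cs, pvH childrens dists (k + 1) c =
        some (pvW childrens dists (k + 1) c) := by
      intro c hc
      have hc' := hch c (by simp [hcs, hc])
      rcases hc' with h1 | h1
      · obtain ⟨x, hx⟩ := pvH_one_of_inactive childrens dists h1
        have := pvH_le childrens dists (by omega : 1 ≤ k + 1) c x hx
        simp [pvW_eq_of_some childrens dists this, this]
      · obtain ⟨x, hx⟩ := ih c h1
        simp [pvW_eq_of_some childrens dists hx, hx]
    refine ⟨cs.foldl (fun m c => if pvW childrens dists (k + 1) c + 1 > m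
        then pvW childrens dists (k + 1) c + 1 else m) 0, ?_⟩
    simp only [pvH, hdists, hcs]
    exact pvHfold_eval cs 0 hchildren

theorem pvChild_some (childrens : List (Int × List Int)) (dists : List (Int × Int)) {k : Nat}
    {c : Int} (h : pvActive childrens dists c = false ∨ c ∈ pvDone childrens dists k) :
    pvH childrens dists (k + 1) c = some (pvW childrens dists (k + 1) c) := by
  rcases h with h | h
  · obtain ⟨x, hx⟩ := pvH_one_of_inactive childrens dists h
    have hx' := pvH_le childrens dists (by omega : 1 ≤ k + 1) c x hx
    rw [pvW_eq_of_some childrens dists hx']; exact hx'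
  · obtain ⟨x, hx⟩ := pvDone_some childrens dists k c h
    rw [pvW_eq_of_some childrens dists hx]; exact hx

-- A-run invariant: the dict D preserves the original cached entries and every entry it
-- holds is a correct height value
def pvGoodD (childrens : List (Int × List Int)) (dists : List (Int × Int))
    (D : PySem.Dict Int Int) : Prop :=
  (∀ v, PySem.Dict.get? (⟨dists⟩ : PySem.Dict Int Int) v ≠ none →
      PySem.Dict.get? D v = PySem.Dict.get? (⟨dists⟩ : PySem.Dict Int Int) v) ∧
  (∀ v x, PySem.Dict.get? D v = some x → ∃ k, pvH childrens dists k v = some x)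

theorem pvALoopA_eval (childrens : List (Int × List Int)) (dists : List (Int × Int))
    (k f : Nat)
    (IH : ∀ v D, pvGoodD childrens dists D →
      (pvActive childrens dists v = false ∨ v ∈ pvDone childrens dists k) →
      ∃ r D' m, pvFindA ⟨childrens⟩ f v D = some (r, D') ∧
        pvH childrens dists m v = some r ∧ pvGoodD childrens dists D') :
    ∀ cs mx D, pvGoodD childrens dists D →
      (∀ c ∈ cs, pvActive childrens dists c = false ∨ c ∈ pvDone childrens dists k) →
      ∃ D', pvALoopA (pvFindA ⟨childrens⟩ f) cs mx D =
          some (cs.foldl (fun m c => if pvW childrens dists (k + 1) c + 1 > m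
            then pvW childrens dists (k + 1) c + 1 else m) mx, D') ∧
        pvGoodD childrens dists D' := by
  intro cs
  induction cs with
  | nil => intro mx D hD _; exact ⟨D, rfl, hD⟩
  | cons c cs ih =>
    intro mx D hD hch
    obtain ⟨r, D', m, hrun, hr, hD'⟩ := IH c D hD (hch c (by simp))
    have hc1 : pvH childrens dists (k + 1) c = some (pvW childrens dists (k + 1) c) :=
      pvChild_some childrens dists (hch c (by simp))
    have hrw : r = pvW childrens dists (k + 1) c := pvH_unique childrens dists hr hc1
    simp only [pvALoopA, hrun, List.foldl_cons]
    subst hrw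
    exact ih _ D' hD' (fun c' hc' => hch c' (by simp [hc']))

theorem pvFindA_correct (childrens : List (Int × List Int)) (dists : List (Int × Int)) :
    ∀ k f v D, pvGoodD childrens dists D → k < f →
      (pvActive childrens dists v = false ∨ v ∈ pvDone childrens dists k) →
      ∃ r D' m, pvFindA ⟨childrens⟩ f v D = some (r, D') ∧
        pvH childrens dists m v = some r ∧ pvGoodD childrens dists D' := by
  intro k
  induction k with
  | zero =>
    intro f v D hD hf hv
    match f, hf with
    | f + 1, _ =>
    simp only [pvFindA]
    match hDv : PySem.Dict.get? D v with
    | some x =>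
      obtain ⟨m, hm⟩ := hD.2 v x hDv
      exact ⟨x, D, m, rfl, hm, hD⟩
    | none =>
      have hdists : PySem.Dict.get? (⟨dists⟩ : PySem.Dict Int Int) v = none := by
        by_contra hne
        rw [hD.1 v hne] at hDv
        exact hne hDv
      have hv' : pvActive childrens dists v = false := by
        rcases hv with h | h
        · exact h
        · simp [pvDone] at h
      have hC : PySem.Dict.get? (⟨childrens⟩ : PySem.Dict Int (List Int)) v = none := by
        simp only [pvActive, hdists, Option.isNone_none, Bool.and_true,
          Option.isSome_eq_false_iff, Option.isNone_iff_eq_none] at hv'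
        exact hv'
      rw [hC]
      exact ⟨0, D, 1, rfl, by simp [pvH, hdists, hC], hD⟩
  | succ k ih =>
    intro f v D hD hf hv
    match f, hf with
    | f + 1, _ =>
    simp only [pvFindA]
    match hDv : PySem.Dict.get? D v with
    | some x =>
      obtain ⟨m, hm⟩ := hD.2 v x hDv
      exact ⟨x, D, m, rfl, hm, hD⟩
    | none =>
      have hdists : PySem.Dict.get? (⟨dists⟩ : PySem.Dict Int Int) v = none := by
        by_contra hne
        rw [hD.1 v hne] at hDv
        exact hne hDv
      match hC : PySem.Dict.get? (⟨childrens⟩ : PySem.Dict Int (List Int)) v with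
      | none => exact ⟨0, D, 1, rfl, by simp [pvH, hdists, hC], hD⟩
      | some cs =>
        have hvdone : v ∈ pvDone childrens dists (k + 1) := by
          rcases hv with h | h
          · exfalso
            simp only [pvActive, hdists, hC, Option.isNone_none, Bool.and_true,
              Option.isSome_some, Bool.true_eq_false] at h
          · exact h
        obtain ⟨_, _, hch⟩ := pvPeel_mem childrens dists hvdone
        rw [hC] at hch
        have hch' : ∀ c ∈ cs, pvActive childrens dists c = false ∨
            c ∈ pvDone childrens dists k := by simpa using hch
        have hfk : k < f := by omega
        obtain ⟨D', hloop, hD'⟩ := pvALoopA_eval childrens dists k f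
          (fun v' D'' hg hv' => ih f v' D'' hg hfk hv') cs 0 D hD hch'
        simp only [hloop]
        refine ⟨_, _, k + 2, rfl, ?_, ?_, ?_⟩
        · show pvH childrens dists (k + 2) v = _
          simp only [pvH, hdists, hC]
          exact pvHfold_eval cs 0 (fun c hc => pvChild_some childrens dists (hch' c hc))
        · intro u hu
          have hne : u ≠ v := by
            intro h; rw [h] at hu; exact hu hdists
          rw [PySem.Dict.get?_insert_of_ne _ _ hne]
          exact hD'.1 u hu
        · intro u x hx
          rw [PySem.Dict.get?_insert] at hx
          by_cases he : u = v
          · rw [if_pos he] at hx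
            refine ⟨k + 2, ?_⟩
            rw [he, ← Option.some_inj.mp hx]
            simp only [pvH, hdists, hC]
            exact pvHfold_eval cs 0 (fun c hc => pvChild_some childrens dists (hch' c hc))
          · rw [if_neg he] at hx
            exact hD'.2 u x hx

-- B-run invariants
def pvBase (childrens : List (Int × List Int)) (dists : List (Int × Int))
    (h : PySem.Dict Int Int) : Prop :=
  (∀ v x, PySem.Dict.get? (⟨dists⟩ : PySem.Dict Int Int) v = some x →
      PySem.Dict.get? h v = some x) ∧
  (∀ v, PySem.Dict.get? h v ≠ none →
      PySem.Dict.get? (⟨dists⟩ : PySem.Dict Int Int) v ≠ none ∨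
      (PySem.Dict.get? (⟨childrens⟩ : PySem.Dict Int (List Int)) v).isSome = true)

def pvStable (childrens : List (Int × List Int)) (dists : List (Int × Int)) (r : Nat)
    (h : PySem.Dict Int Int) : Prop :=
  pvBase childrens dists h ∧
  ∀ v ∈ pvDone childrens dists r,
    PySem.Dict.get? h v = some (pvW childrens dists (r + 1) v)

theorem pvBest_exact (childrens : List (Int × List Int)) (dists : List (Int × Int))
    {k : Nat} {v : Int} {h : PySem.Dict Int Int}
    (hv : v ∈ pvDone childrens dists (k + 1))
    (hbase : pvBase childrens dists h)
    (hex : ∀ u ∈ pvDone childrens dists k,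
      PySem.Dict.get? h u = some (pvW childrens dists (k + 1) u)) :
    pvBest ⟨childrens⟩ h v = pvW childrens dists (k + 2) v := by
  obtain ⟨_, hact, hch⟩ := pvPeel_mem childrens dists hv
  simp only [pvActive, Bool.and_eq_true, Option.isSome_iff_exists,
    Option.isNone_iff_eq_none] at hact
  obtain ⟨⟨cs, hcs⟩, hdists⟩ := hact
  rw [hcs] at hch
  have hch' : ∀ c ∈ cs, pvActive childrens dists c = false ∨
      c ∈ pvDone childrens dists k := by simpa using hch
  have hcval : ∀ c ∈ cs, PySem.Dict.getD h c 0 = pvW childrens dists (k + 1) c := by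
    intro c hc
    rcases hch' c hc with hca | hcd
    · simp only [pvActive, Bool.and_eq_false_iff, Option.isSome_eq_false_iff,
        Option.isNone_iff_eq_none, Option.isNone_eq_false_iff, Option.isSome_iff_exists] at hca
      rcases hca with hcC | hcD
      · -- c not a key: cached or absent from h
        match hcd2 : PySem.Dict.get? (⟨dists⟩ : PySem.Dict Int Int) c with
        | some x =>
          have hhx := hbase.1 c x hcd2
          have h1 : pvH childrens dists 1 c = some x := by simp [pvH, hcd2]
          have := pvH_le childrens dists (by omega : 1 ≤ k + 1) c x h1
          rw [pvW_eq_of_some childrens dists this]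
          simp [PySem.Dict.getD_eq_get?_getD, hhx]
        | none =>
          have hnone : PySem.Dict.get? h c = none := by
            by_contra hne
            rcases hbase.2 c hne with h2 | h2
            · exact h2 hcd2
            · rw [hcC] at h2; simp at h2
          have h1 : pvH childrens dists 1 c = some 0 := by simp [pvH, hcd2, hcC]
          have := pvH_le childrens dists (by omega : 1 ≤ k + 1) c 0 h1
          rw [pvW_eq_of_some childrens dists this]
          simp [PySem.Dict.getD_eq_get?_getD, hnone]
      · -- c cached in dists
        obtain ⟨x, hx⟩ := hcD
        have hhx := hbase.1 c x hx
        have h1 : pvH childrens dists 1 c = some x := by simp [pvH, hx]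
        have := pvH_le childrens dists (by omega : 1 ≤ k + 1) c x h1
        rw [pvW_eq_of_some childrens dists this]
        simp [PySem.Dict.getD_eq_get?_getD, hhx]
    · rw [PySem.Dict.getD_eq_get?_getD, hex c hcd]; rfl
  have hfold : pvBest ⟨childrens⟩ h v =
      cs.foldl (fun m c => if pvW childrens dists (k + 1) c + 1 > m
        then pvW childrens dists (k + 1) c + 1 else m) 0 := by
    simp only [pvBest, hcs, Option.getD_some]
    apply PySem.List.foldl_congr_mem
    intro acc c hc
    simp only [hcval c hc]
  have hH : pvH childrens dists (k + 2) v =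
      some (cs.foldl (fun m c => if pvW childrens dists (k + 1) c + 1 > m
        then pvW childrens dists (k + 1) c + 1 else m) 0) := by
    simp only [pvH, hdists, hcs]
    exact pvHfold_eval cs 0 (fun c hc => pvChild_some childrens dists (hch' c hc))
  rw [hfold, pvW_eq_of_some childrens dists hH]

-- the effect of one table update (either performed or skipped because unchanged)
theorem pvUpd_inv (childrens : List (Int × List Int)) (dists : List (Int × Int)) (r : Nat)
    (h h' : PySem.Dict Int Int) (v : Int)
    (hvkey : v ∈ PySem.List.dedup (childrens.map Prod.fst))
    (hvunc : PySem.Dict.get? (⟨dists⟩ : PySem.Dict Int Int) v = none)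
    (hnew : ∀ u, PySem.Dict.get? h' u =
      if u = v then some (pvBest ⟨childrens⟩ h v) else PySem.Dict.get? h u)
    (hbase : pvBase childrens dists h)
    (hexr : ∀ u ∈ pvDone childrens dists r,
      PySem.Dict.get? h u = some (pvW childrens dists (r + 1) u)) :
    pvBase childrens dists h' ∧
    (∀ u ∈ pvDone childrens dists r,
      PySem.Dict.get? h' u = some (pvW childrens dists (r + 1) u)) ∧
    (∀ u ∈ pvDone childrens dists (r + 1),
      (u = v ∨ PySem.Dict.get? h u = some (pvW childrens dists (r + 2) u)) →
      PySem.Dict.get? h' u = some (pvW childrens dists (r + 2) u)) := by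
  have hvC : (PySem.Dict.get? (⟨childrens⟩ : PySem.Dict Int (List Int)) v).isSome = true := by
    rw [Option.isSome_iff_ne_none]
    intro hcon
    have hvk : v ∈ (⟨childrens⟩ : PySem.Dict Int (List Int)).keys := by
      simpa [PySem.Dict.keys] using (PySem.List.mem_dedup _ _).mp hvkey
    have := (PySem.Dict.get?_eq_none_iff_not_mem_keys _ _).mp hcon
    exact this hvk
  have hbest : ∀ k, v ∈ pvDone childrens dists (k + 1) →
      (∀ u ∈ pvDone childrens dists k,
        PySem.Dict.get? h u = some (pvW childrens dists (k + 1) u)) →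
      pvBest ⟨childrens⟩ h v = pvW childrens dists (k + 2) v :=
    fun k hv hx => pvBest_exact childrens dists hv hbase hx
  refine ⟨⟨?_, ?_⟩, ?_, ?_⟩
  · intro u x hx
    rw [hnew u]
    have hne : u ≠ v := by intro he; rw [he, hvunc] at hx; simp at hx
    rw [if_neg hne]; exact hbase.1 u x hx
  · intro u hu
    rw [hnew u] at hu
    by_cases he : u = v
    · right; rw [he]; exact hvC
    · rw [if_neg he] at hu; exact hbase.2 u hu
  · intro u hu
    rw [hnew u]
    by_cases he : u = v
    · subst he
      rw [if_pos rfl]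
      have hv1 : u ∈ pvDone childrens dists (r + 1) := pvDone_mono childrens dists r u hu
      rw [hbest r hv1 hexr]
      obtain ⟨x, hx⟩ := pvDone_some childrens dists r u hu
      rw [pvW_eq_of_some childrens dists hx,
        pvW_eq_of_some childrens dists (pvH_mono childrens dists _ u x hx)]
    · rw [if_neg he]; exact hexr u hu
  · intro u hu hpre
    rw [hnew u]
    by_cases he : u = v
    · subst he
      rw [if_pos rfl, hbest r hu hexr]
    · rcases hpre with hpre | hpre
      · exact absurd hpre he
      · rw [if_neg he]; exact hpre

theorem pvBLoop_inv (childrens : List (Int × List Int)) (dists : List (Int × Int)) (r : Nat) :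
    ∀ (vs : List Int) (h : PySem.Dict Int Int) (ch : Bool),
      (∀ v ∈ vs, v ∈ PySem.List.dedup (childrens.map Prod.fst)) →
      pvBase childrens dists h →
      (∀ u ∈ pvDone childrens dists r,
        PySem.Dict.get? h u = some (pvW childrens dists (r + 1) u)) →
      (∀ u ∈ pvDone childrens dists (r + 1), u ∉ vs →
        PySem.Dict.get? h u = some (pvW childrens dists (r + 2) u)) →
      pvBase childrens dists (pvBLoop ⟨childrens⟩ ⟨dists⟩ vs h ch).1 ∧
      (∀ u ∈ pvDone childrens dists (r + 1),
        PySem.Dict.get? (pvBLoop ⟨childrens⟩ ⟨dists⟩ vs h ch).1 u =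
          some (pvW childrens dists (r + 2) u)) := by
  intro vs
  induction vs with
  | nil =>
    intro h ch _ hbase hexr hex1
    exact ⟨hbase, fun u hu => hex1 u hu (by simp)⟩
  | cons v vs ih =>
    intro h ch hkeys hbase hexr hex1
    simp only [pvBLoop]
    match hcv : PySem.Dict.get? (⟨dists⟩ : PySem.Dict Int Int) v with
    | some x =>
      simp only [Option.isSome_some, if_pos]
      refine ih h ch (fun u hu => hkeys u (by simp [hu])) hbase hexr ?_
      intro u hu hnu
      refine hex1 u hu ?_
      intro hmem
      rcases List.mem_cons.mp hmem with he | hm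
      · subst he
        obtain ⟨_, hact, _⟩ := pvPeel_mem childrens dists hu
        simp only [pvActive, Bool.and_eq_true, Option.isNone_iff_eq_none] at hact
        rw [hact.2] at hcv; simp at hcv
      · exact hnu hm
    | none =>
      simp only [Option.isSome_none, Bool.false_eq_true, reduceIte]
      have hvkey : v ∈ PySem.List.dedup (childrens.map Prod.fst) := hkeys v (by simp)
      by_cases heq : PySem.Dict.get? h v = some (pvBest ⟨childrens⟩ h v)
      · rw [if_pos heq]
        have hnew : ∀ u, PySem.Dict.get? h u =
            if u = v then some (pvBest ⟨childrens⟩ h v) else PySem.Dict.get? h u := by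
          intro u; by_cases he : u = v
          · rw [if_pos he, he]; exact heq
          · rw [if_neg he]
        obtain ⟨hb', hr', h1'⟩ := pvUpd_inv childrens dists r h h v hvkey hcv hnew hbase hexr
        refine ih h ch (fun u hu => hkeys u (by simp [hu])) hb' hr' ?_
        intro u hu hnu
        by_cases he : u = v
        · exact h1' u hu (Or.inl he)
        · exact h1' u hu (Or.inr (hex1 u hu (by simp [he, hnu])))
      · rw [if_neg heq]
        have hnew : ∀ u, PySem.Dict.get? (PySem.Dict.insert h v (pvBest ⟨childrens⟩ h v)) u =
            if u = v then some (pvBest ⟨childrens⟩ h v) else PySem.Dict.get? h u := by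
          intro u; rw [PySem.Dict.get?_insert]
        obtain ⟨hb', hr', h1'⟩ := pvUpd_inv childrens dists r h _ v hvkey hcv hnew hbase hexr
        refine ih _ true (fun u hu => hkeys u (by simp [hu])) hb' hr' ?_
        intro u hu hnu
        by_cases he : u = v
        · exact h1' u hu (Or.inl he)
        · exact h1' u hu (Or.inr (hex1 u hu (by simp [he, hnu])))

theorem pvRound_step (childrens : List (Int × List Int)) (dists : List (Int × Int))
    (r : Nat) (h : PySem.Dict Int Int) (hs : pvStable childrens dists r h) :
    pvStable childrens dists (r + 1)
      (pvBLoop ⟨childrens⟩ ⟨dists⟩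
        (PySem.List.dedup ((⟨childrens⟩ : PySem.Dict Int (List Int)).keys)) h false).1 := by
  have := pvBLoop_inv childrens dists r
    (PySem.List.dedup ((⟨childrens⟩ : PySem.Dict Int (List Int)).keys)) h false
    (fun v hv => hv) hs.1 hs.2
    (fun u hu hnu => absurd (pvDone_subset_keys childrens dists (r + 1) u hu) hnu)
  exact ⟨this.1, this.2⟩

theorem pvBLoop_flag_true (childrens : List (Int × List Int)) (dists : List (Int × Int)) :
    ∀ (vs : List Int) (h : PySem.Dict Int Int),
      (pvBLoop ⟨childrens⟩ ⟨dists⟩ vs h true).2 = true := by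
  intro vs
  induction vs with
  | nil => intro h; rfl
  | cons v vs ih =>
    intro h
    simp only [pvBLoop]
    split
    · exact ih h
    · split
      · exact ih h
      · exact ih _

theorem pvBLoop_unchanged (childrens : List (Int × List Int)) (dists : List (Int × Int)) :
    ∀ (vs : List Int) (h h'' : PySem.Dict Int Int),
      pvBLoop ⟨childrens⟩ ⟨dists⟩ vs h false = (h'', false) → h'' = h := by
  intro vs
  induction vs with
  | nil =>
    intro h h'' he
    simp only [pvBLoop] at he
    injection he with h1 _
    exact h1.symm
  | cons v vs ih =>
    intro h h'' he
    simp only [pvBLoop] at he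
    split at he
    · exact ih h h'' he
    · split at he
      · exact ih h h'' he
      · exfalso
        have := congrArg Prod.snd he
        rw [pvBLoop_flag_true childrens dists] at this
        exact Bool.noConfusion this

theorem pvStable_fix (childrens : List (Int × List Int)) (dists : List (Int × Int))
    (h : PySem.Dict Int Int)
    (hfix : (pvBLoop ⟨childrens⟩ ⟨dists⟩
      (PySem.List.dedup ((⟨childrens⟩ : PySem.Dict Int (List Int)).keys)) h false).1 = h) :
    ∀ r j, pvStable childrens dists r h → pvStable childrens dists (r + j) h := by
  intro r j
  induction j with
  | zero => exact fun hs => hs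
  | succ j ih =>
    intro hs
    have := pvRound_step childrens dists (r + j) h (ih hs)
    rw [hfix] at this
    exact (by omega : r + (j + 1) = r + j + 1) ▸ this

theorem pvIterB_stable (childrens : List (Int × List Int)) (dists : List (Int × Int)) :
    ∀ m r h, pvStable childrens dists r h →
      pvStable childrens dists (r + m) (pvIterB ⟨childrens⟩ ⟨dists⟩ m h) := by
  intro m
  induction m with
  | zero => intro r h hs; exact hs
  | succ m ih =>
    intro r h hs
    simp only [pvIterB]
    match hrun : pvBLoop ⟨childrens⟩ ⟨dists⟩
        (PySem.List.dedup ((⟨childrens⟩ : PySem.Dict Int (List Int)).keys)) h false with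
    | (h', true) =>
      have hstep := pvRound_step childrens dists r h hs
      rw [hrun] at hstep
      have := ih (r + 1) h' hstep
      exact (by omega : r + (m + 1) = r + 1 + m) ▸ this
    | (h', false) =>
      have he : h' = h := pvBLoop_unchanged childrens dists _ h h' hrun
      subst he
      have hfix : (pvBLoop ⟨childrens⟩ ⟨dists⟩
          (PySem.List.dedup ((⟨childrens⟩ : PySem.Dict Int (List Int)).keys)) h' false).1 = h' := by
        rw [hrun]
      exact pvStable_fix childrens dists h' hfix r (m + 1) hs

-- ===== VERDICT (by name: the statement is the Claim_ definition above) =====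
theorem find_dist_from_leaf_spec : Claim_equal_find_dist_from_leaf := by
  unfold Claim_equal_find_dist_from_leaf
  intro childrens nd dists _ hpre
  unfold Spec_find_dist_from_leaf
  unfold find_dist_from_leaf find_dist_from_leaf_alt
  match h1 : PySem.Dict.get? (⟨dists⟩ : PySem.Dict Int Int) nd with
  | some x => simp [pvFindA, h1]
  | none =>
    match h2 : PySem.Dict.get? (⟨childrens⟩ : PySem.Dict Int (List Int)) nd with
    | none => simp [pvFindA, h1, h2]
    | some cs =>
      have hact : pvActive childrens dists nd = true := by simp [pvActive, h1, h2]
      have hdone := hpre hact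
      have hgood0 : pvGoodD childrens dists ⟨dists⟩ :=
        ⟨fun v _ => rfl, fun v x hx => ⟨1, by simp [pvH, hx]⟩⟩
      obtain ⟨r, D', m, hrun, hr, _⟩ := pvFindA_correct childrens dists
        (PySem.List.dedup (childrens.map Prod.fst)).length
        ((PySem.List.dedup (childrens.map Prod.fst)).length + 1) nd ⟨dists⟩
        hgood0 (by omega) (Or.inr hdone)
      have hst0 : pvStable childrens dists 0 (⟨dists⟩ : PySem.Dict Int Int) :=
        ⟨⟨fun v x hx => hx, fun v h => Or.inl h⟩, fun v hv => by simp [pvDone] at hv⟩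
      have hst := pvIterB_stable childrens dists
        (PySem.List.dedup (childrens.map Prod.fst)).length 0 ⟨dists⟩ hst0
      rw [Nat.zero_add] at hst
      have hnd := hst.2 nd hdone
      have hW : pvH childrens dists ((PySem.List.dedup (childrens.map Prod.fst)).length + 1) nd =
          some (pvW childrens dists ((PySem.List.dedup (childrens.map Prod.fst)).length + 1) nd) :=
        pvChild_some childrens dists (Or.inr hdone)
      have hrw : r = pvW childrens dists
          ((PySem.List.dedup (childrens.map Prod.fst)).length + 1) nd :=
        pvH_unique childrens dists hr hW
      simp only [hrun]
      rw [PySem.Dict.getD_eq_get?_getD]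
      rw [hnd]
      simpa using hrw
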